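-- pv_equiv track=rewrite | github.com/str-Mattaya/240-439_test_project | src/staircase.py | gen_staircase
-- ===== SOURCE A (Python) =====
-- def gen_staircase(n: int, display: str):
--     staircase = []
--     space = ' ' * len(display)
--
--     if 0 < n <= 30:
--         for i in range(1,n+1):
--             step = (space * (n-i)) + (display * i)
--             staircase.append(step)
--     return staircase
-- ===== SOURCE B (Python) =====
-- def gen_staircase(n: int, display: str):
--     if not (0 < n <= 30):
--         return []
--     space = ' ' * len(display)
--     row = space * n
--     res = []
--     for _ in range(n):
--         row = row[len(display):] + display
--         res.append(row)
--     return res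
-- ===== Notes on version B (the rewrite author's own statement) =====
-- stated objective: alternative
-- what changed: B derives each row incrementally from the previous one (drop one leading space-block, append one display-block) with a rolling row string, instead of recomputing space*(n-i)+display*i from scratch for every i.
import Mathlib
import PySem

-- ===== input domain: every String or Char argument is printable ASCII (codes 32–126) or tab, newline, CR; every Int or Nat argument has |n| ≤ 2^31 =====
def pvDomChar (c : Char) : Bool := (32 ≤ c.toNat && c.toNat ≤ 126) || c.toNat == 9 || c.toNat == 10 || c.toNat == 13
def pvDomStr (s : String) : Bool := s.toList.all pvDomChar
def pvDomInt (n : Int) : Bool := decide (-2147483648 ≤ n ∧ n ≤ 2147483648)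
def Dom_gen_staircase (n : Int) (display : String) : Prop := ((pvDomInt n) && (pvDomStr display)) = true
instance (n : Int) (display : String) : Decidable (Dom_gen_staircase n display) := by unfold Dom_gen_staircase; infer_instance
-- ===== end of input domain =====

-- B builds each row incrementally from the previous one instead of recomputing it; same cost, different decomposition.

-- ===== PORT A =====
-- Python string repetition 's * k' (empty for k ≤ 0) — hand-ported, exact (no PySem primitive for it)
def repChars (cs : List Char) : Nat → List Char
  | 0 => []
  | k + 1 => cs ++ repChars cs k

def charsTimes (cs : List Char) (k : Int) : List Char := repChars cs k.toNat

def gen_staircase (n : Int) (display : String) : List String :=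
  let space := List.replicate display.toList.length ' '   -- ' ' * len(display)
  if 0 < n ∧ n ≤ 30 then
    (PySem.List.pyRange 1 (n + 1) 1).foldl
      (fun staircase i =>
        staircase ++ [String.ofList (charsTimes space (n - i) ++ charsTimes display.toList i)])
      []
  else []

-- ===== PORT B =====
def gen_staircase_alt (n : Int) (display : String) : List String :=
  if 0 < n ∧ n ≤ 30 then
    let d := display.toList
    let space := List.replicate d.length ' '
    ((List.range n.toNat).foldl
      (fun (st : List String × List Char) _ =>
        let row := PySem.List.slice st.2 (some (d.length : Int)) none ++ d
        (st.1 ++ [String.ofList row], row))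
      ([], charsTimes space n)).1
  else []

-- ===== PRECONDITION & SPEC =====
def Spec_gen_staircase (n : Int) (display : String) (out : List String) : Prop := out = gen_staircase_alt n display
instance (n : Int) (display : String) (out : List String) : Decidable (Spec_gen_staircase n display out) := by unfold Spec_gen_staircase; infer_instance

-- ===== CLAIM (what is proved, stated in full; the proofs are below) =====
def Claim_equal_gen_staircase : Prop := ∀ (n : Int) (display : String), Dom_gen_staircase n display → Spec_gen_staircase n display (gen_staircase n display)

-- ===== LEMMAS AND PROOFS =====

theorem repChars_succ_right (cs : List Char) (k : Nat) :
    repChars cs (k + 1) = repChars cs k ++ cs := by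
  induction k with
  | zero => simp [repChars]
  | succ k ih =>
    calc repChars cs (k + 2) = cs ++ (repChars cs k ++ cs) := by rw [repChars, ih]
      _ = (cs ++ repChars cs k) ++ cs := by rw [List.append_assoc]
      _ = repChars cs (k + 1) ++ cs := by rw [repChars]

theorem loop_inv (d : List Char) (M m : Nat) (hm : m ≤ M) :
    (List.range m).foldl
        (fun (st : List String × List Char) _ =>
          (st.1 ++ [String.ofList (st.2.drop d.length ++ d)], st.2.drop d.length ++ d))
        ([], repChars (List.replicate d.length ' ') M)
    = ((List.range m).map
        (fun k => String.ofList (repChars (List.replicate d.length ' ') (M - 1 - k) ++ repChars d (k + 1))),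
       repChars (List.replicate d.length ' ') (M - m) ++ repChars d m) := by
  induction m with
  | zero => simp [repChars]
  | succ m ih =>
    rw [List.range_succ, List.foldl_append, ih (by omega), List.map_append]
    have h1 : M - m = (M - (m + 1)) + 1 := by omega
    have h2 : M - 1 - m = M - (m + 1) := by omega
    simp only [List.foldl_cons, List.foldl_nil, List.map_cons, List.map_nil, h1, h2]
    rw [repChars]
    have hd : (List.replicate d.length ' ' ++
        (repChars (List.replicate d.length ' ') (M - (m + 1)) ++ repChars d m)).drop d.length
        = repChars (List.replicate d.length ' ') (M - (m + 1)) ++ repChars d m := by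
      exact List.drop_left' (by simp)
    rw [List.append_assoc, hd, List.append_assoc, ← repChars_succ_right]

-- ===== VERDICT (by name: the statement is the Claim_ definition above) =====
theorem gen_staircase_spec : Claim_equal_gen_staircase := by
  intro n display _
  unfold Spec_gen_staircase gen_staircase gen_staircase_alt
  by_cases h : 0 < n ∧ n ≤ 30
  · simp only [if_pos h]
    rw [PySem.List.foldl_append_singleton_eq_map, PySem.List.pyRange_one, List.map_map]
    have hb : ((n + 1 : Int) - 1).toNat = n.toNat := by omega
    rw [hb]
    simp only [PySem.List.slice_from_natCast, charsTimes]
    rw [loop_inv display.toList n.toNat n.toNat le_rfl]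
    simp only [List.nil_append]
    refine List.map_congr_left ?_
    intro k hk
    rw [List.mem_range] at hk
    have e1 : (n - (1 + (k : Int))).toNat = n.toNat - 1 - k := by omega
    have e2 : ((1 : Int) + (k : Int)).toNat = k + 1 := by omega
    simp [e1, e2]
  · simp [if_neg h]
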